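-- pv_equiv track=rewrite | github.com/linardsb/merkle-email-hub | app/ai/templates/composer.py | _build_dark_mode_css
-- ===== SOURCE A (Python) =====
-- def _build_dark_mode_css(classes: set[str]) -> str:
--     """Build dark mode CSS block for given class names."""
--     css_map: dict[str, str] = {
--         "dark-bg": "background-color: #1a1a2e !important;",
--         "dark-text": "color: #e5e5e5 !important;",
--     }
--     rules: list[str] = []
--     for cls in sorted(classes):
--         if cls in css_map:
--             rules.append(f"      .{cls} {{ {css_map[cls]} }}")
--
--     if not rules:
--         return ""
--
--     media_rules = "\n".join(rules)
--     outlook_rules_parts: list[str] = []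
--     for cls in sorted(classes):
--         if cls in css_map:
--             outlook_rules_parts.append(f"    [data-ogsc] .{cls} {{ {css_map[cls]} }}")
--     outlook_rules = "\n".join(outlook_rules_parts)
--     return f"""
--     @media (prefers-color-scheme: dark) {{
-- {media_rules}
--     }}
-- {outlook_rules}"""
-- ===== SOURCE B (Python) =====
-- def _build_dark_mode_css(classes: set[str]) -> str:
--     """Build dark mode CSS block for given class names."""
--     # The style map has exactly two known classes; "dark-bg" < "dark-text",
--     # so two O(1) membership tests replace the sort+filter scans entirely.
--     pairs = []
--     if "dark-bg" in classes:
--         pairs.append(("dark-bg", "background-color: #1a1a2e !important;"))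
--     if "dark-text" in classes:
--         pairs.append(("dark-text", "color: #e5e5e5 !important;"))
--     if not pairs:
--         return ""
--     media = "\n".join(f"      .{c} {{ {v} }}" for c, v in pairs)
--     outlook = "\n".join(f"    [data-ogsc] .{c} {{ {v} }}" for c, v in pairs)
--     return f"""
--     @media (prefers-color-scheme: dark) {{
-- {media}
--     }}
-- {outlook}"""
-- ===== Notes on version B (the rewrite author's own statement) =====
-- stated objective: faster
-- what changed: Instead of sorting the class set twice and filtering each sorted pass against the style map, B does two O(1) set-membership tests for the only two known style classes (which are already in sorted order) and builds both rule lists from the matched pairs in one step.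
import Mathlib
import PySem

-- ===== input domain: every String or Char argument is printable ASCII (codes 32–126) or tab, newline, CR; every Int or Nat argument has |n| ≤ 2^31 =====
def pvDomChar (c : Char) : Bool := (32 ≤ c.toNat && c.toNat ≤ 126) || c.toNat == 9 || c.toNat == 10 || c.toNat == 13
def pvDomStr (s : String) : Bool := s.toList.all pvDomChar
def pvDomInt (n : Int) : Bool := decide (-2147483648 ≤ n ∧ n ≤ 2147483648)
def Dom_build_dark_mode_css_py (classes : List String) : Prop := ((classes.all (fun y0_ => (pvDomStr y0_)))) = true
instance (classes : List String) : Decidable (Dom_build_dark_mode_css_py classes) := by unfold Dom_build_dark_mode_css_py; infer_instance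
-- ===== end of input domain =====

-- B replaces the sort+filter scans by two O(1) membership tests against the two known
-- style-map classes ("dark-bg" < "dark-text"), assembling the same CSS block.

-- ===== PORT A =====
def pvCssMap : PySem.Dict String String :=
  PySem.Dict.mk [("dark-bg", "background-color: #1a1a2e !important;"),
                 ("dark-text", "color: #e5e5e5 !important;")]

def build_dark_mode_css_py (classes : List String) : String :=
  let rules : List String :=
    (PySem.List.sorted classes (fun x => x) false).foldl
      (fun acc cls =>
        if pvCssMap.contains cls then
          acc ++ ["      ." ++ cls ++ " { " ++ pvCssMap.getD cls "" ++ " }"]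
        else acc) []
  if rules = [] then ""
  else
    let media_rules := PySem.Str.join "\n" rules
    let outlook_rules_parts : List String :=
      (PySem.List.sorted classes (fun x => x) false).foldl
        (fun acc cls =>
          if pvCssMap.contains cls then
            acc ++ ["    [data-ogsc] ." ++ cls ++ " { " ++ pvCssMap.getD cls "" ++ " }"]
          else acc) []
    let outlook_rules := PySem.Str.join "\n" outlook_rules_parts
    "\n    @media (prefers-color-scheme: dark) {\n" ++ media_rules ++ "\n    }\n" ++ outlook_rules

-- ===== PORT B =====
def build_dark_mode_css_py_alt (classes : List String) : String :=
  let pairs : List (String × String) :=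
    (if PySem.Set.contains classes "dark-bg" then
       [("dark-bg", "background-color: #1a1a2e !important;")] else [])
    ++ (if PySem.Set.contains classes "dark-text" then
       [("dark-text", "color: #e5e5e5 !important;")] else [])
  if pairs = [] then ""
  else
    let media := PySem.Str.join "\n" (pairs.map (fun cv => "      ." ++ cv.1 ++ " { " ++ cv.2 ++ " }"))
    let outlook := PySem.Str.join "\n" (pairs.map (fun cv => "    [data-ogsc] ." ++ cv.1 ++ " { " ++ cv.2 ++ " }"))
    "\n    @media (prefers-color-scheme: dark) {\n" ++ media ++ "\n    }\n" ++ outlook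

-- ===== PRECONDITION & SPEC =====
-- `classes` is a Python set: its List String encoding holds the DISTINCT elements.
def Pre_build_dark_mode_css_py (classes : List String) : Prop := classes.Nodup
instance (classes : List String) : Decidable (Pre_build_dark_mode_css_py classes) := by unfold Pre_build_dark_mode_css_py; infer_instance
def pvWitness_build_dark_mode_css_py : List String := ["dark-text", "x", "dark-bg"]

def Spec_build_dark_mode_css_py (classes : List String) (out : String) : Prop := out = build_dark_mode_css_py_alt classes
instance (classes : List String) (out : String) : Decidable (Spec_build_dark_mode_css_py classes out) := by unfold Spec_build_dark_mode_css_py; infer_instance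

-- ===== CLAIM (what is proved, stated in full; the proofs are below) =====
def Claim_equal_build_dark_mode_css_py : Prop := ∀ (classes : List String), Dom_build_dark_mode_css_py classes → Pre_build_dark_mode_css_py classes → Spec_build_dark_mode_css_py classes (build_dark_mode_css_py classes)

-- ===== LEMMAS AND PROOFS =====

-- A strictly increasing list over the two-element alphabet {a, b} (a < b) is
-- determined by membership alone.
lemma pv_two_elem_sorted (a b : String) (hab : a < b) (l : List String)
    (hp : l.Pairwise (· < ·)) (hmem : ∀ x ∈ l, x = a ∨ x = b) :
    l = (if a ∈ l then [a] else []) ++ (if b ∈ l then [b] else []) := by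
  cases l with
  | nil => simp
  | cons x t =>
    cases t with
    | nil =>
      rcases hmem x (by simp) with h | h <;> subst h <;> simp [hab.ne, hab.ne']
    | cons y rest =>
      have hxy : x < y := (List.pairwise_cons.1 hp).1 y (by simp)
      have hx : x = a ∨ x = b := hmem x (by simp)
      have hy : y = a ∨ y = b := hmem y (by simp)
      have hxa : x = a := by
        rcases hx with h | h
        · exact h
        · exfalso; subst h
          rcases hy with h' | h' <;> subst h'
          · exact absurd hab (not_lt.2 hxy.le)
          · exact lt_irrefl _ hxy
      have hyb : y = b := by
        subst hxa
        rcases hy with h' | h'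
        · exact absurd hxy (by simp [h'])
        · exact h'
      have hrest : rest = [] := by
        cases rest with
        | nil => rfl
        | cons z zs =>
          exfalso
          have hyz : y < z :=
            (List.pairwise_cons.1 (List.pairwise_cons.1 hp).2).1 z (by simp)
          have hbz : b < z := by rw [← hyb]; exact hyz
          rcases hmem z (by simp) with h | h <;> subst h
          · exact absurd hab (not_lt.2 hbz.le)
          · exact lt_irrefl _ hbz
      subst hrest
      rw [hxa, hyb]
      simp [hab.ne']

-- The style-map keys are in order: "dark-bg" < "dark-text".
lemma pv_bg_lt_text : ("dark-bg" : String) < "dark-text" := by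
  simp [String.lt_iff_toList_lt]; decide

-- The filter of sorted(classes) on the style-map keys, characterized by membership.
lemma pv_filter_sorted (classes : List String) (hnd : classes.Nodup) :
    ((PySem.List.sorted classes (fun x => x) false).filter
        (fun cls => pvCssMap.contains cls))
      = (if "dark-bg" ∈ classes then ["dark-bg"] else [])
        ++ (if "dark-text" ∈ classes then ["dark-text"] else []) := by
  set s := PySem.List.sorted classes (fun x => x) false with hs
  have hperm : s.Perm classes := PySem.List.sorted_perm ..
  have hnds : s.Nodup := hperm.nodup_iff.2 hnd
  have hple : s.Pairwise (· ≤ ·) := by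
    simpa using PySem.List.sorted_pairwise (xs := classes) (key := fun x : String => x)
  have hplt : s.Pairwise (· < ·) := by
    have := hple.and hnds
    exact this.imp (fun h => lt_of_le_of_ne h.1 h.2)
  have hf := pv_two_elem_sorted "dark-bg" "dark-text" pv_bg_lt_text
      (s.filter (fun cls => pvCssMap.contains cls))
      (hplt.filter _)
      (by
        intro x hx
        have hx' := List.of_mem_filter hx
        revert hx'
        simp [pvCssMap, PySem.Dict.contains]
        tauto)
  have hmemf : ∀ (k : String), pvCssMap.contains k = true →
      (k ∈ s.filter (fun cls => pvCssMap.contains cls) ↔ k ∈ classes) := by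
    intro k hk
    rw [List.mem_filter]
    constructor
    · intro h; exact hperm.mem_iff.1 h.1
    · intro h; exact ⟨hperm.mem_iff.2 h, hk⟩
  rw [hf]
  rw [if_congr (hmemf "dark-bg" (by simp [pvCssMap, PySem.Dict.contains])) rfl rfl,
      if_congr (hmemf "dark-text" (by simp [pvCssMap, PySem.Dict.contains])) rfl rfl]

-- ===== VERDICT (by name: the statement is the Claim_ definition above) =====
theorem build_dark_mode_css_py_spec : Claim_equal_build_dark_mode_css_py := by
  intro classes _ hpre
  unfold Spec_build_dark_mode_css_py
  unfold build_dark_mode_css_py build_dark_mode_css_py_alt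
  rw [PySem.List.foldl_append_if (p := fun cls => pvCssMap.contains cls),
      PySem.List.foldl_append_if (p := fun cls => pvCssMap.contains cls)]
  rw [pv_filter_sorted classes hpre]
  by_cases hbg : "dark-bg" ∈ classes <;> by_cases htx : "dark-text" ∈ classes <;>
    simp [hbg, htx, PySem.Set.contains, pvCssMap, PySem.Dict.getD, PySem.Dict.get?,
      PySem.Str.join]
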